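-- pv_equiv track=rewrite | github.com/Hu-MARX/MVE | common.py | get_matched_trackboxes
-- ===== SOURCE A (Python) =====
-- def get_matched_trackboxes(track_bboxes,track_bboxes2):
--     track_boxes=[]
--     track_boxes2=[]
--
--     if len(track_bboxes)==0:
--         pass
--     else:
--         for ii,xy in enumerate(track_bboxes):
--             for jj,yz in enumerate(track_bboxes2):
--                 if xy[0]==yz[0]:
--                     track_boxes.append(track_bboxes[ii])
--                     track_boxes2.append(track_bboxes2[jj])
--     return track_boxes,track_boxes2
-- ===== SOURCE B (Python) =====
-- def get_matched_trackboxes(track_bboxes, track_bboxes2):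
--     # Group track_bboxes2 by first element once, then one lookup per row.
--     groups = {}
--     for yz in track_bboxes2:
--         k = yz[0]
--         groups[k] = groups.get(k, []) + [yz]
--     track_boxes = []
--     track_boxes2 = []
--     for xy in track_bboxes:
--         ms = groups.get(xy[0], [])
--         track_boxes += [xy] * len(ms)
--         track_boxes2 += ms
--     return track_boxes, track_boxes2
-- ===== Notes on version B (the rewrite author's own statement) =====
-- stated objective: alternative
-- what changed: Replaces the nested O(n*m) scan by a one-pass hash grouping of track_bboxes2 by first element followed by one dict lookup per row of track_bboxes (asymptotically fewer comparisons; not confirmed faster in a timing run on match-dense inputs).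
-- outside the precondition, e.g. on get_matched_trackboxes([[]], []): A returns ([], []), B raises IndexError; on get_matched_trackboxes([], [[]]): A returns ([], []), B raises IndexError
import Mathlib
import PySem

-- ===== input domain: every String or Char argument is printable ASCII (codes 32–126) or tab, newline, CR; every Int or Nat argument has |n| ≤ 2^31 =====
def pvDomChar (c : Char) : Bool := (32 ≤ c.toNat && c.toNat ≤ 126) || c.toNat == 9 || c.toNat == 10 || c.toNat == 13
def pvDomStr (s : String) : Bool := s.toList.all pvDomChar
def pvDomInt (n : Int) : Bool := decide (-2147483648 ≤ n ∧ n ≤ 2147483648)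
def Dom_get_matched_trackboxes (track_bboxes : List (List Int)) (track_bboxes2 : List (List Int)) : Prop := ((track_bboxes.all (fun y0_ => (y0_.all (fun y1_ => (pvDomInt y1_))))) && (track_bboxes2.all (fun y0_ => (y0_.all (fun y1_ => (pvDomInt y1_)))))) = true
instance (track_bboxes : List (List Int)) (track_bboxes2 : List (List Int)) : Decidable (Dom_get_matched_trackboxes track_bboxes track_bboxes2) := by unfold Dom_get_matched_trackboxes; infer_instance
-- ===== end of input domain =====

-- B replaces A's nested scan by a hash grouping of track_bboxes2 by first element
-- plus one dict lookup per row of track_bboxes (objective: alternative algorithm).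

-- ===== PORT A =====
-- xy[0] / yz[0]: Pre_ guarantees every indexed inner list is nonempty, so headI is exact there.
def get_matched_trackboxes (track_bboxes : List (List Int)) (track_bboxes2 : List (List Int)) : List (List Int) × List (List Int) :=
  if track_bboxes.length = 0 then
    (([] : List (List Int)), ([] : List (List Int)))
  else
    track_bboxes.foldl (fun acc xy =>
      track_bboxes2.foldl (fun acc2 yz =>
        if xy.headI = yz.headI then (acc2.1 ++ [xy], acc2.2 ++ [yz]) else acc2) acc)
      (([] : List (List Int)), ([] : List (List Int)))

-- ===== PORT B =====
def get_matched_trackboxes_alt (track_bboxes : List (List Int)) (track_bboxes2 : List (List Int)) : List (List Int) × List (List Int) :=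
  let groups : PySem.Dict Int (List (List Int)) :=
    track_bboxes2.foldl (fun g yz => g.modify yz.headI [] (· ++ [yz])) PySem.Dict.empty
  track_bboxes.foldl (fun acc xy =>
    let ms := groups.getD xy.headI []
    (acc.1 ++ List.replicate ms.length xy, acc.2 ++ ms))
    (([] : List (List Int)), ([] : List (List Int)))

-- ===== PRECONDITION & SPEC =====
-- Pre_ excludes the inputs where indexing an empty inner row raises IndexError in A; it is
-- slightly narrower than A's exact domain: it also excludes inputs with an empty inner row
-- where A happens to return a pair of empty lists only because the other argument is empty,
-- while B's grouping/lookup naturally indexes every row's head and raises there.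
def Pre_get_matched_trackboxes (track_bboxes : List (List Int)) (track_bboxes2 : List (List Int)) : Prop :=
  (∀ xs ∈ track_bboxes, xs ≠ []) ∧ (∀ ys ∈ track_bboxes2, ys ≠ [])
instance (track_bboxes : List (List Int)) (track_bboxes2 : List (List Int)) : Decidable (Pre_get_matched_trackboxes track_bboxes track_bboxes2) := by unfold Pre_get_matched_trackboxes; infer_instance

def pvWitness_get_matched_trackboxes : List (List Int) × List (List Int) := ([[1, 2], [3, 4]], [[1, 7], [5, 6], [1, 8]])

def Spec_get_matched_trackboxes (track_bboxes : List (List Int)) (track_bboxes2 : List (List Int)) (out : List (List Int) × List (List Int)) : Prop := out = get_matched_trackboxes_alt track_bboxes track_bboxes2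
instance (track_bboxes : List (List Int)) (track_bboxes2 : List (List Int)) (out : List (List Int) × List (List Int)) : Decidable (Spec_get_matched_trackboxes track_bboxes track_bboxes2 out) := by unfold Spec_get_matched_trackboxes; infer_instance

-- ===== CLAIM (what is proved, stated in full; the proofs are below) =====
def Claim_equal_get_matched_trackboxes : Prop := ∀ (track_bboxes : List (List Int)) (track_bboxes2 : List (List Int)), Dom_get_matched_trackboxes track_bboxes track_bboxes2 → Pre_get_matched_trackboxes track_bboxes track_bboxes2 → Spec_get_matched_trackboxes track_bboxes track_bboxes2 (get_matched_trackboxes track_bboxes track_bboxes2)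

-- ===== LEMMAS AND PROOFS =====

-- A's inner loop over track_bboxes2 appends, for one xy, the matching rows of t2.
theorem pv_inner (t2 : List (List Int)) (xy : List Int) (a b : List (List Int)) :
    t2.foldl (fun acc2 yz =>
        if xy.headI = yz.headI then (acc2.1 ++ [xy], acc2.2 ++ [yz]) else acc2) (a, b)
      = (a ++ List.replicate (t2.filter (fun yz => yz.headI == xy.headI)).length xy,
         b ++ t2.filter (fun yz => yz.headI == xy.headI)) := by
  induction t2 generalizing a b with
  | nil => simp
  | cons yz t2 ih =>
    simp only [List.foldl_cons, List.filter_cons]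
    by_cases h : xy.headI = yz.headI
    · rw [if_pos h, ih]
      have hb : (yz.headI == xy.headI) = true := by simp [h]
      simp [hb, List.replicate_succ]
    · rw [if_neg h, ih]
      have hb : (yz.headI == xy.headI) = false := by
        simp only [beq_eq_false_iff_ne, ne_eq]
        exact fun e => h e.symm
      simp [hb]

-- A's outer loop in closed form.
theorem pv_outerA (t1 t2 : List (List Int)) (a b : List (List Int)) :
    t1.foldl (fun acc xy =>
        t2.foldl (fun acc2 yz =>
          if xy.headI = yz.headI then (acc2.1 ++ [xy], acc2.2 ++ [yz]) else acc2) acc) (a, b)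
      = (a ++ t1.flatMap (fun xy => List.replicate (t2.filter (fun yz => yz.headI == xy.headI)).length xy),
         b ++ t1.flatMap (fun xy => t2.filter (fun yz => yz.headI == xy.headI))) := by
  induction t1 generalizing a b with
  | nil => simp
  | cons xy t1 ih => simp [List.foldl_cons, pv_inner, ih]

-- B's grouping dict looks up to exactly the matching rows of t2.
theorem pv_groups (t2 : List (List Int)) (c : Int) :
    (t2.foldl (fun g yz => g.modify yz.headI [] (· ++ [yz])) PySem.Dict.empty).getD c []
      = t2.filter (fun yz => yz.headI == c) := by
  have h := PySem.Dict.getD_foldl_modify_append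
      (l := t2.map (fun yz => (yz.headI, yz))) (d := (PySem.Dict.empty : PySem.Dict Int (List (List Int)))) (c := c)
  rw [List.foldl_map] at h
  simpa [List.filter_map, Function.comp_def] using h

-- B's output loop in closed form.
theorem pv_outerB (t1 : List (List Int)) (ms : List Int → List (List Int)) (a b : List (List Int)) :
    t1.foldl (fun acc xy =>
        (acc.1 ++ List.replicate (ms xy).length xy, acc.2 ++ ms xy)) (a, b)
      = (a ++ t1.flatMap (fun xy => List.replicate (ms xy).length xy),
         b ++ t1.flatMap ms) := by
  induction t1 generalizing a b with
  | nil => simp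
  | cons xy t1 ih => simp [List.foldl_cons, ih]

-- ===== VERDICT (by name: the statement is the Claim_ definition above) =====
set_option maxRecDepth 10000 in
theorem get_matched_trackboxes_spec : Claim_equal_get_matched_trackboxes := by
  intro t1 t2 _ _
  show get_matched_trackboxes t1 t2 = get_matched_trackboxes_alt t1 t2
  unfold get_matched_trackboxes get_matched_trackboxes_alt
  rw [pv_outerA]
  rw [pv_outerB t1 (fun xy =>
    (t2.foldl (fun g yz => g.modify yz.headI [] (· ++ [yz])) PySem.Dict.empty).getD xy.headI [])]
  simp only [pv_groups]
  cases t1 <;> simp
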